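-- pv_equiv track=rewrite | github.com/jalddak/ps_training | python/programmers/level 0/등수 매기기.py | solution
-- ===== SOURCE A (Python) =====
-- def solution(score):
--     answer = []
--     score_list = score
--     score_sum = []
--     for score in score_list:
--         score_sum.append(sum(score))
--     score_sum.sort(reverse = True)
--     score_rank = {}
--     for index in range(len(score_sum)):
--         if score_sum[index] not in score_rank:
--             score_rank[score_sum[index]] = index + 1
--     for score in score_list:
--         answer.append(score_rank[sum(score)])
--     return answer
-- ===== SOURCE B (Python) =====
-- def solution(score):
--     sums = [sum(row) for row in score]
--     return [1 + sum(1 for s in sums if s > x) for x in sums]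
-- ===== Notes on version B (the rewrite author's own statement) =====
-- stated objective: simpler
-- what changed: Replaces A's sort + first-index rank dictionary with a direct count-of-strictly-greater-sums per row (competition ranking computed by counting, no sorting and no dict).
import Mathlib
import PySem

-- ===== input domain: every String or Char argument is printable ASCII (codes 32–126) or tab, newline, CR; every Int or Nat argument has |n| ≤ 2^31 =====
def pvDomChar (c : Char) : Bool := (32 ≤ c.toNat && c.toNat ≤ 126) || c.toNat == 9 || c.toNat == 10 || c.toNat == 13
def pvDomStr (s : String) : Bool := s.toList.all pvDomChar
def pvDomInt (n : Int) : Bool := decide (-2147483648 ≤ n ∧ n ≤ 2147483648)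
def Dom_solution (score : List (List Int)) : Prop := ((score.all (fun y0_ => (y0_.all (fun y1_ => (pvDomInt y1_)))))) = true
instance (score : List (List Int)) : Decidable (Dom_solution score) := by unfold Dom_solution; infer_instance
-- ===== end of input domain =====

-- B replaces A's sort + first-index rank dictionary with a direct count of strictly greater row sums (same values; different decomposition).


-- ===== PORT A =====
-- score_sum[index] is ported with pyGetD (index drawn from range(len(score_sum)) is always in range)
-- and score_rank[sum(score)] with Dict.getD (the key sum(score) is always present), so both are exact.
def solution (score : List (List Int)) : List Int :=
  let score_list := score
  let score_sum := score_list.foldl (fun acc s => acc ++ [s.sum]) ([] : List Int)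
  let score_sum := PySem.List.sorted score_sum (fun x => x) true
  let score_rank := (PySem.List.pyRange 0 (score_sum.length : Int) 1).foldl
      (fun d i =>
        if !(d.contains (PySem.List.pyGetD score_sum i 0)) then
          d.insert (PySem.List.pyGetD score_sum i 0) (i + 1)
        else d)
      (PySem.Dict.empty : PySem.Dict Int Int)
  score_list.foldl (fun acc s => acc ++ [score_rank.getD s.sum 0]) []

-- ===== PORT B =====
def solution_alt (score : List (List Int)) : List Int :=
  let sums := score.map (fun row => row.sum)
  sums.map (fun x => 1 + (sums.countP (fun s => decide (x < s)) : Int))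

-- ===== PRECONDITION & SPEC =====
def Spec_solution (score : List (List Int)) (out : List Int) : Prop := out = solution_alt score
instance (score : List (List Int)) (out : List Int) : Decidable (Spec_solution score out) := by unfold Spec_solution; infer_instance

-- ===== CLAIM (what is proved, stated in full; the proofs are below) =====
def Claim_equal_solution : Prop := ∀ (score : List (List Int)), Dom_solution score → Spec_solution score (solution score)

-- ===== LEMMAS AND PROOFS =====

-- the body of A's rank-building loop, over (index, value) pairs
def rankStep (d : PySem.Dict Int Int) (p : Int × Int) : PySem.Dict Int Int :=
  if !(d.contains p.2) then d.insert p.2 (p.1 + 1) else d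

-- once a key is in the dict, the rank loop never changes its value
lemma rank_preserve (t : List Int) : ∀ (s : Int) (d : PySem.Dict Int Int) (v : Int),
    d.contains v = true →
    ((PySem.List.enumerate t s).foldl rankStep d).getD v 0 = d.getD v 0 := by
  induction t with
  | nil => intro s d v _; simp [PySem.List.enumerate_nil]
  | cons x xs ih =>
    intro s d v hv
    rw [PySem.List.enumerate_cons, List.foldl_cons]
    by_cases hx : d.contains x = true
    · simpa [rankStep, hx] using ih (s+1) d v hv
    · have hne : v ≠ x := by intro h; rw [h] at hv; simp [hv] at hx
      have hx' : d.contains x = false := by simpa using hx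
      have hc : (d.insert x (s + 1)).contains v = true := by
        rw [PySem.Dict.contains_insert]; simp [hv]
      rw [rankStep]; simp only [hx', Bool.not_false, if_true]
      rw [ih (s+1) _ v hc, PySem.Dict.getD_insert_of_ne d (s+1) 0 hne]

-- for a descending list t, the rank of v ∈ t is its first index + 1 = (#elements > v) + offset + 1
lemma rank_lookup (t : List Int) : ∀ (s : Int) (d : PySem.Dict Int Int) (v : Int),
    t.Pairwise (fun a b => b ≤ a) → v ∈ t → d.contains v = false →
    ((PySem.List.enumerate t s).foldl rankStep d).getD v 0
      = s + (t.countP (fun x => decide (v < x)) : Int) + 1 := by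
  induction t with
  | nil => intro _ _ _ _ hv _; simp at hv
  | cons x xs ih =>
    intro s d v hp hv hd
    rw [PySem.List.enumerate_cons, List.foldl_cons]
    have hxs : ∀ y ∈ xs, y ≤ x := fun y hy => (List.pairwise_cons.1 hp).1 y hy
    by_cases hvx : v = x
    · subst hvx
      have hstep : rankStep d (s, v) = d.insert v (s + 1) := by
        simp [rankStep, hd]
      rw [hstep, rank_preserve xs (s+1) _ v (PySem.Dict.contains_insert_self _ _ _),
        PySem.Dict.getD_insert_self]
      have hcnt : (v :: xs).countP (fun y => decide (v < y)) = 0 := by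
        rw [List.countP_eq_zero]
        intro y hy
        rcases List.mem_cons.1 hy with h | h
        · subst h; simp
        · simp [not_lt.2 (hxs y h)]
      rw [hcnt]; ring
    · have hvxs : v ∈ xs := by rcases List.mem_cons.1 hv with h | h; exact absurd h hvx; exact h
      have hvlt : v < x := lt_of_le_of_ne (hxs v hvxs) hvx
      have hd' : (rankStep d (s, x)).contains v = false := by
        by_cases hx : d.contains x = true
        · simpa [rankStep, hx] using hd
        · have hx' : d.contains x = false := by simpa using hx
          rw [rankStep]; simp only [hx', Bool.not_false, if_true, PySem.Dict.contains_insert]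
          simp [hd, hvx]
      rw [ih (s+1) _ v (List.pairwise_cons.1 hp).2 hvxs hd']
      have : (x :: xs).countP (fun y => decide (v < y))
          = xs.countP (fun y => decide (v < y)) + 1 := by
        rw [List.countP_cons]; simp [hvlt]
      rw [this]; push_cast; ring

-- A's rank dict lookup equals B's count-of-greater + 1, for any v among the sums
lemma rank_eq_count (sums : List Int) (v : Int) (hv : v ∈ sums) :
    ((PySem.List.pyRange 0 ((PySem.List.sorted sums (fun x => x) true).length : Int) 1).foldl
      (fun d i =>
        if !(d.contains (PySem.List.pyGetD (PySem.List.sorted sums (fun x => x) true) i 0)) then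
          d.insert (PySem.List.pyGetD (PySem.List.sorted sums (fun x => x) true) i 0) (i + 1)
        else d)
      (PySem.Dict.empty : PySem.Dict Int Int)).getD v 0
    = 1 + (sums.countP (fun s => decide (v < s)) : Int) := by
  set t := PySem.List.sorted sums (fun x => x) true with ht
  have hperm : t.Perm sums := PySem.List.sorted_perm sums (fun x => x) true
  have hfold : (PySem.List.pyRange 0 (t.length : Int) 1).foldl
      (fun d i =>
        if !(d.contains (PySem.List.pyGetD t i 0)) then
          d.insert (PySem.List.pyGetD t i 0) (i + 1)
        else d)
      (PySem.Dict.empty : PySem.Dict Int Int)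
      = (PySem.List.enumerate t 0).foldl rankStep PySem.Dict.empty := by
    rw [PySem.List.enumerate_eq_map_pyRange (d := 0), List.foldl_map]
    simp [rankStep, PySem.List.len]
  rw [hfold, rank_lookup t 0 PySem.Dict.empty v
      (by simpa using PySem.List.sorted_pairwise_rev sums (fun x => x))
      (hperm.mem_iff.2 hv) (PySem.Dict.contains_empty v),
    hperm.countP_eq]
  ring

-- ===== VERDICT (by name: the statement is the Claim_ definition above) =====
theorem solution_spec : Claim_equal_solution := by
  intro score _
  show solution score = solution_alt score
  unfold solution solution_alt
  simp only [PySem.List.foldl_append_singleton_eq_map, List.nil_append, List.map_map]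
  apply List.map_congr_left
  intro s hs
  simp only [Function.comp_apply]
  have h : List.map (fun (row : List Int) => row.sum) score = List.map List.sum score := rfl
  rw [h]
  exact rank_eq_count (List.map List.sum score) s.sum (List.mem_map.2 ⟨s, hs, rfl⟩)
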